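-- pv_equiv track=rewrite | github.com/sho1216/DDR | detectedhangingnotes.py | findHangingNotes
-- ===== SOURCE A (Python) =====
-- import copy
--
-- def findHangingNotes(pitches):
--     prevPitch = -1
--     hangingNotesList = copy.deepcopy(pitches)
--
--     streak = []
--     writeStreak = ''
--
--     for i in range(len(pitches)-2):
--         if abs(pitches[i] - pitches[i+1]) <= 25 and (
--             abs(pitches[i+1] - pitches[i+2]) <= 25):
--
--             if pitches[i] > 300:
--                 if pitches[i] not in streak:
--                     streak.append(pitches[i])
--                     writeStreak += str(pitches[i]) + '\n'
--                 if pitches[i+1] not in streak: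
--                     streak.append(pitches[i+1])
--                     writeStreak += str(pitches[i+1]) + '\n'
--                 if pitches[i+2] not in streak:
--                     streak.append(pitches[i+2])
--                     writeStreak += str(pitches[i+2]) + '\n'
--
--     return writeStreak
-- ===== SOURCE B (Python) =====
-- def findHangingNotes(pitches):
--     # Single forward pass over positions: carry the qualification flags of the
--     # previous two windows; a position is emitted (once per distinct value, in
--     # position order) iff one of the three windows covering it qualifies.
--     n = len(pitches)
--     seen = set()
--     out = ''
--     f1 = f2 = False
--     for p in range(n):
--         q = (p + 2 < n
--              and abs(pitches[p] - pitches[p + 1]) <= 25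
--              and abs(pitches[p + 1] - pitches[p + 2]) <= 25
--              and pitches[p] > 300)
--         if (f1 or f2 or q) and pitches[p] not in seen:
--             seen.add(pitches[p])
--             out += str(pitches[p]) + '\n'
--         f1, f2 = f2, q
--     return out
-- ===== Notes on version B (the rewrite author's own statement) =====
-- stated objective: faster
-- what changed: Replaces the window loop that re-emits each qualifying triple with a single forward pass over positions carrying the previous two windows' qualification flags, deduplicating via a hash set instead of scanning a growing list.
import Mathlib
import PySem

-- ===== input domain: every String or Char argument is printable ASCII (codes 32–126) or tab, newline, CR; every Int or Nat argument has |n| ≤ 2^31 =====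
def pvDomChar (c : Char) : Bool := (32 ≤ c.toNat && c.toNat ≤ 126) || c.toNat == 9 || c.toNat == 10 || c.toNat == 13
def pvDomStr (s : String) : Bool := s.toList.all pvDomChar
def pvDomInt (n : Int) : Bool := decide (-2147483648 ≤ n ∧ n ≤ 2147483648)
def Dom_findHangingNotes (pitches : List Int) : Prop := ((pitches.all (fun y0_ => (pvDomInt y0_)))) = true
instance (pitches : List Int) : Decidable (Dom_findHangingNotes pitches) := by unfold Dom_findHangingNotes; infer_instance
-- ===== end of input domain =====

-- B replaces A's window loop (which re-emits each qualifying triple, deduplicating by a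
-- linear scan of a growing list) with a single forward pass over positions carrying the
-- previous two windows' qualification flags and a set for deduplication.

-- ===== PORT A =====
-- loop body of A: the two ≤25 checks, the >300 guard, then the three append-if-new blocks.
-- prevPitch and the deepcopy'd hangingNotesList are unused by A and have no observable
-- effect; every index i, i+1, i+2 with i in range(len-2) is in range, so pyGetD's
-- default is never used.
def fhnStepA (pitches : List Int) (st : List Int × String) (i : Int) : List Int × String :=
  if |PySem.List.pyGetD pitches i 0 - PySem.List.pyGetD pitches (i+1) 0| ≤ 25 ∧
     |PySem.List.pyGetD pitches (i+1) 0 - PySem.List.pyGetD pitches (i+2) 0| ≤ 25 then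
    if PySem.List.pyGetD pitches i 0 > 300 then
      let st := if PySem.List.pyGetD pitches i 0 ∈ st.1 then st else
        (st.1 ++ [PySem.List.pyGetD pitches i 0],
         st.2 ++ PySem.Int.toStr (PySem.List.pyGetD pitches i 0) ++ "\n")
      let st := if PySem.List.pyGetD pitches (i+1) 0 ∈ st.1 then st else
        (st.1 ++ [PySem.List.pyGetD pitches (i+1) 0],
         st.2 ++ PySem.Int.toStr (PySem.List.pyGetD pitches (i+1) 0) ++ "\n")
      if PySem.List.pyGetD pitches (i+2) 0 ∈ st.1 then st else
        (st.1 ++ [PySem.List.pyGetD pitches (i+2) 0],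
         st.2 ++ PySem.Int.toStr (PySem.List.pyGetD pitches (i+2) 0) ++ "\n")
    else st
  else st

def findHangingNotes (pitches : List Int) : String :=
  ((PySem.List.pyRange 0 ((pitches.length : Int) - 2) 1).foldl (fhnStepA pitches)
    (([] : List Int), "")).2

-- ===== PORT B =====
-- loop body of B: state is ((seen, out), (f1, f2)); f1, f2 are the qualification flags of
-- the windows starting at p-2 and p-1; the nested if on p+2 < n reflects Python's
-- short-circuit of the 'and' chain.
def fhnStepB (pitches : List Int) (st : (PySem.Set Int × String) × Bool × Bool) (p : Int) :
    (PySem.Set Int × String) × Bool × Bool :=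
  let x := PySem.List.pyGetD pitches p 0
  let q : Bool :=
    if p + 2 < (pitches.length : Int) then
      decide (|x - PySem.List.pyGetD pitches (p+1) 0| ≤ 25) &&
      decide (|PySem.List.pyGetD pitches (p+1) 0 - PySem.List.pyGetD pitches (p+2) 0| ≤ 25) &&
      decide (x > 300)
    else false
  let so :=
    if (st.2.1 || st.2.2 || q) && !(PySem.Set.contains st.1.1 x) then
      (PySem.Set.add st.1.1 x, st.1.2 ++ PySem.Int.toStr x ++ "\n")
    else st.1
  (so, st.2.2, q)

def findHangingNotes_alt (pitches : List Int) : String :=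
  (((PySem.List.pyRange 0 (pitches.length : Int) 1).foldl (fhnStepB pitches)
    ((PySem.Set.empty, ""), (false, false))).1).2

-- ===== PRECONDITION & SPEC =====
def Spec_findHangingNotes (pitches : List Int) (out : String) : Prop := out = findHangingNotes_alt pitches
instance (pitches : List Int) (out : String) : Decidable (Spec_findHangingNotes pitches out) := by unfold Spec_findHangingNotes; infer_instance

-- ===== CLAIM (what is proved, stated in full; the proofs are below) =====
def Claim_equal_findHangingNotes : Prop := ∀ (pitches : List Int), Dom_findHangingNotes pitches → Spec_findHangingNotes pitches (findHangingNotes pitches)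

-- ===== LEMMAS AND PROOFS =====

-- window qualification
def fhnQ (x y z : Int) : Bool := decide (|x - y| ≤ 25) && decide (|y - z| ≤ 25) && decide (x > 300)

-- qualification of the window starting at the head of the list (false if too short)
def fhnQhead : List Int → Bool
  | x :: y :: z :: _ => fhnQ x y z
  | _ => false

-- emit v if not seen: append to the seen list and to the output string
def fhnD (st : List Int × String) (v : Int) : List Int × String :=
  if v ∈ st.1 then st else (st.1 ++ [v], st.2 ++ PySem.Int.toStr v ++ "\n")

-- structural form of A's window loop
def fhnFA : List Int → (List Int × String) → (List Int × String)
  | x :: y :: z :: t, st => fhnFA (y :: z :: t) (if fhnQ x y z then fhnD (fhnD (fhnD st x) y) z else st)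
  | _, st => st

-- structural form of B's position loop
def fhnFB : List Int → Bool → Bool → (List Int × String) → (List Int × String)
  | [], _, _, st => st
  | x :: r, f1, f2, st =>
      fhnFB r f2 (fhnQhead (x :: r)) (if f1 || f2 || fhnQhead (x :: r) then fhnD st x else st)

lemma fhnFA_cons3 (x y z : Int) (t : List Int) (st : List Int × String) :
    fhnFA (x :: y :: z :: t) st
      = fhnFA (y :: z :: t) (if fhnQ x y z then fhnD (fhnD (fhnD st x) y) z else st) := rfl

lemma fhnFB_cons (x : Int) (r : List Int) (f1 f2 : Bool) (st : List Int × String) :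
    fhnFB (x :: r) f1 f2 st
      = fhnFB r f2 (fhnQhead (x :: r)) (if f1 || f2 || fhnQhead (x :: r) then fhnD st x else st) := rfl

lemma fhnD_mem_self (st : List Int × String) (v : Int) : v ∈ (fhnD st v).1 := by
  unfold fhnD; split <;> simp_all

lemma fhnD_mem_mono (st : List Int × String) (v w : Int) (h : w ∈ st.1) : w ∈ (fhnD st v).1 := by
  unfold fhnD; split <;> simp_all

lemma fhnD_of_mem (st : List Int × String) (v : Int) (h : v ∈ st.1) : fhnD st v = st := by
  unfold fhnD; simp [h]

-- main lemma: A's window loop and B's flagged position pass compute the same state,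
-- given the invariant that flagged-covered elements at the front were already emitted
lemma fhn_main (l : List Int) : ∀ (f1 f2 : Bool) (st : List Int × String),
    ((f1 || f2) = true → ∀ x r, l = x :: r → x ∈ st.1) →
    (f2 = true → ∀ x y r, l = x :: y :: r → y ∈ st.1) →
    fhnFA l st = fhnFB l f1 f2 st := by
  induction l with
  | nil => intro f1 f2 st _ _; rfl
  | cons x r ih =>
    intro f1 f2 st h1 h2
    rcases r with _ | ⟨y, _ | ⟨z, t⟩⟩
    · -- l = [x]
      have hq : fhnQhead [x] = false := rfl
      have hs : (if f1 || f2 || fhnQhead [x] then fhnD st x else st) = st := by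
        by_cases hf : (f1 || f2) = true
        · simp [hq, hf, fhnD_of_mem _ _ (h1 hf x [] rfl)]
        · simp [Bool.not_eq_true] at hf; simp [hq, hf]
      rw [fhnFB_cons, hs]; rfl
    · -- l = [x, y]
      have hq : fhnQhead [x, y] = false := rfl
      have hq' : fhnQhead [y] = false := rfl
      have hs : (if f1 || f2 || fhnQhead [x, y] then fhnD st x else st) = st := by
        by_cases hf : (f1 || f2) = true
        · simp [hq, hf, fhnD_of_mem _ _ (h1 hf x [y] rfl)]
        · simp [Bool.not_eq_true] at hf; simp [hq, hf]
      have hs' : (if f2 || fhnQhead [x, y] || fhnQhead [y] then fhnD st y else st) = st := by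
        by_cases hf : f2 = true
        · simp [hq, hq', hf, fhnD_of_mem _ _ (h2 hf x y [] rfl)]
        · simp [Bool.not_eq_true] at hf; simp [hq, hq', hf]
      rw [fhnFB_cons, hs, fhnFB_cons, hs']; rfl
    · -- l = x :: y :: z :: t
      have hq : fhnQhead (x :: y :: z :: t) = fhnQ x y z := rfl
      by_cases hqc : fhnQ x y z = true
      · -- qualifying window: A emits x, y, z now; B emits x now and y, z on the
        -- next two (forced-covered) steps
        set st3 := fhnD (fhnD (fhnD st x) y) z with hst3
        have hy : y ∈ st3.1 := fhnD_mem_mono _ _ _ (fhnD_mem_self _ _)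
        have hz : z ∈ st3.1 := fhnD_mem_self _ _
        have hIH : fhnFA (y :: z :: t) st3 = fhnFB (y :: z :: t) f2 true st3 := by
          apply ih
          · intro _ a ra ha
            injection ha with e1 e2; subst e1; exact hy
          · intro _ a b rb hb
            injection hb with e1 e2; injection e2 with e3 e4; subst e3; exact hz
        calc fhnFA (x :: y :: z :: t) st
            = fhnFA (y :: z :: t) st3 := by rw [fhnFA_cons3, if_pos hqc]
          _ = fhnFB (y :: z :: t) f2 true st3 := hIH
          _ = fhnFB (z :: t) true (fhnQhead (y :: z :: t)) st3 := by
                rw [fhnFB_cons, if_pos (by simp), fhnD_of_mem _ _ hy]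
          _ = fhnFB t (fhnQhead (y :: z :: t)) (fhnQhead (z :: t)) st3 := by
                rw [fhnFB_cons, if_pos (by simp), fhnD_of_mem _ _ hz]
          _ = fhnFB (z :: t) true (fhnQhead (y :: z :: t)) (fhnD (fhnD st x) y) := by
                rw [fhnFB_cons z t true (fhnQhead (y :: z :: t)) (fhnD (fhnD st x) y),
                    if_pos (by simp)]
          _ = fhnFB (y :: z :: t) f2 true (fhnD st x) := by
                rw [fhnFB_cons y (z :: t) f2 true (fhnD st x), if_pos (by simp)]
          _ = fhnFB (x :: y :: z :: t) f1 f2 st := by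
                rw [fhnFB_cons x (y :: z :: t) f1 f2 st, hq, hqc, if_pos (by simp)]
      · -- non-qualifying window: both sides leave the state unchanged
        have hqc' : fhnQ x y z = false := by simpa using hqc
        have hs : (if f1 || f2 || fhnQhead (x :: y :: z :: t) then fhnD st x else st) = st := by
          by_cases hf : (f1 || f2) = true
          · simp [hq, hqc', hf, fhnD_of_mem _ _ (h1 hf x (y :: z :: t) rfl)]
          · simp [Bool.not_eq_true] at hf; simp [hq, hqc', hf]
        have hIH : fhnFA (y :: z :: t) st = fhnFB (y :: z :: t) f2 false st := by
          apply ih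
          · intro hf a ra ha
            injection ha with e1 e2; subst e1
            rcases (Bool.or_eq_true _ _).mp hf with hf' | hf'
            · exact h2 hf' x y (z :: t) rfl
            · exact absurd hf' (by simp)
          · intro hf; exact absurd hf (by simp)
        rw [fhnFA_cons3, hqc', if_neg (by simp), fhnFB_cons, hs, hq, hqc']
        exact hIH

-- bridge: A's indexed fold over range(len-2) equals the structural recursion fhnFA
lemma fhn_bridgeA (P : List Int) (l : List Int) (k : Nat) (st : List Int × String)
    (hl : l = P.drop k) :
    (PySem.List.pyRange (k : Int) ((P.length : Int) - 2) 1).foldl (fhnStepA P) st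
      = fhnFA l st := by
  induction l generalizing k st with
  | nil =>
    have hk : P.length ≤ k := by
      have h := congrArg List.length hl
      simp [List.length_drop] at h
      omega
    rw [PySem.List.pyRange_one_eq_nil (by omega)]
    rfl
  | cons x r ih =>
    have hPl : P.length = k + (r.length + 1) := by
      have h := congrArg List.length hl
      simp [List.length_drop] at h
      omega
    have hget : ∀ (j : Nat) (v : Int), (x :: r)[j]? = some v → P[k + j]? = some v := by
      intro j v hv
      rw [← List.getElem?_drop, ← hl]; exact hv
    have hx : PySem.List.pyGetD P (k : Int) 0 = x := by
      have h0 : P[k]? = some x := hget 0 x rfl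
      rw [PySem.List.pyGetD_natCast, List.getD_eq_getElem?_getD, h0]; rfl
    rcases r with _ | ⟨y, _ | ⟨z, t⟩⟩
    · -- only 1 element remains: range over len-2 is already exhausted
      have hplen : P.length = k + 1 := by simpa using hPl
      rw [PySem.List.pyRange_one_eq_nil (by omega)]
      rfl
    · have hplen : P.length = k + 2 := by simpa using hPl
      rw [PySem.List.pyRange_one_eq_nil (by omega)]
      rfl
    · -- a full window remains
      have hplen : P.length = k + (t.length + 3) := by simpa using hPl
      have hy : PySem.List.pyGetD P ((k : Int) + 1) 0 = y := by
        have h1 : P[k + 1]? = some y := hget 1 y rfl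
        have hc : ((k : Int) + 1) = ((k + 1 : Nat) : Int) := by omega
        rw [hc, PySem.List.pyGetD_natCast, List.getD_eq_getElem?_getD, h1]; rfl
      have hz : PySem.List.pyGetD P ((k : Int) + 2) 0 = z := by
        have h2 : P[k + 2]? = some z := hget 2 z rfl
        have hc : ((k : Int) + 2) = ((k + 2 : Nat) : Int) := by omega
        rw [hc, PySem.List.pyGetD_natCast, List.getD_eq_getElem?_getD, h2]; rfl
      have hcons : (k : Int) < (P.length : Int) - 2 := by omega
      rw [PySem.List.pyRange_one_cons hcons, List.foldl_cons]
      have hstep : fhnStepA P st (k : Int)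
          = if fhnQ x y z then fhnD (fhnD (fhnD st x) y) z else st := by
        unfold fhnStepA fhnQ fhnD
        rw [hx, hy, hz]
        by_cases c1 : |x - y| ≤ 25 <;> by_cases c2 : |y - z| ≤ 25 <;> by_cases c3 : x > 300 <;>
          simp [c1, c2, c3]
      rw [hstep]
      have htail : y :: z :: t = P.drop (k + 1) := by
        rw [← List.tail_drop, ← hl]; rfl
      have hc : ((k : Int) + 1) = ((k + 1 : Nat) : Int) := by omega
      rw [hc, ih (k + 1) _ htail, fhnFA_cons3]

-- the state update of B's loop body, rephrased through fhnD
lemma fhnStepB_state (s : PySem.Set Int × String) (c : Bool) (x : Int) :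
    (if c && !(PySem.Set.contains s.1 x) then
       (PySem.Set.add s.1 x, s.2 ++ PySem.Int.toStr x ++ "\n")
     else s) = (if c then fhnD s x else s) := by
  by_cases hm : x ∈ s.1 <;> by_cases hc : c = true <;>
    simp_all [fhnD]

-- bridge: B's indexed fold over range(n) equals the structural recursion fhnFB
lemma fhn_bridgeB (P : List Int) (l : List Int) (k : Nat) (f1 f2 : Bool) (st : List Int × String)
    (hl : l = P.drop k) :
    (((PySem.List.pyRange (k : Int) (P.length : Int) 1).foldl (fhnStepB P) (st, (f1, f2))).1)
      = fhnFB l f1 f2 st := by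
  induction l generalizing k f1 f2 st with
  | nil =>
    have hk : P.length ≤ k := by
      have h := congrArg List.length hl
      simp [List.length_drop] at h
      omega
    rw [PySem.List.pyRange_one_eq_nil (by omega)]
    rfl
  | cons x r ih =>
    have hPl : P.length = k + (r.length + 1) := by
      have h := congrArg List.length hl
      simp [List.length_drop] at h
      omega
    have hget : ∀ (j : Nat) (v : Int), (x :: r)[j]? = some v → P[k + j]? = some v := by
      intro j v hv
      rw [← List.getElem?_drop, ← hl]; exact hv
    have hx : PySem.List.pyGetD P (k : Int) 0 = x := by
      have h0 : P[k]? = some x := hget 0 x rfl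
      rw [PySem.List.pyGetD_natCast, List.getD_eq_getElem?_getD, h0]; rfl
    have hcons : (k : Int) < (P.length : Int) := by omega
    have hqeq : (if (k : Int) + 2 < (P.length : Int) then
        decide (|PySem.List.pyGetD P ((k : Int)) 0 - PySem.List.pyGetD P ((k : Int)+1) 0| ≤ 25) &&
        decide (|PySem.List.pyGetD P ((k : Int)+1) 0 - PySem.List.pyGetD P ((k : Int)+2) 0| ≤ 25) &&
        decide (PySem.List.pyGetD P ((k : Int)) 0 > 300)
      else false) = fhnQhead (x :: r) := by
      rcases r with _ | ⟨y, _ | ⟨z, t⟩⟩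
      · have hplen : P.length = k + 1 := by simpa using hPl
        rw [if_neg (by omega)]; rfl
      · have hplen : P.length = k + 2 := by simpa using hPl
        rw [if_neg (by omega)]; rfl
      · have hplen : P.length = k + (t.length + 3) := by simpa using hPl
        have hy : PySem.List.pyGetD P ((k : Int) + 1) 0 = y := by
          have h1 : P[k + 1]? = some y := hget 1 y rfl
          have hc : ((k : Int) + 1) = ((k + 1 : Nat) : Int) := by omega
          rw [hc, PySem.List.pyGetD_natCast, List.getD_eq_getElem?_getD, h1]; rfl
        have hz : PySem.List.pyGetD P ((k : Int) + 2) 0 = z := by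
          have h2 : P[k + 2]? = some z := hget 2 z rfl
          have hc : ((k : Int) + 2) = ((k + 2 : Nat) : Int) := by omega
          rw [hc, PySem.List.pyGetD_natCast, List.getD_eq_getElem?_getD, h2]; rfl
        rw [if_pos (by omega), hx, hy, hz]; rfl
    have hstep : fhnStepB P (st, (f1, f2)) (k : Int)
        = ((if f1 || f2 || fhnQhead (x :: r) then fhnD st x else st), (f2, fhnQhead (x :: r))) := by
      unfold fhnStepB
      simp only [hqeq]
      simp only [hx]
      rw [fhnStepB_state st (f1 || f2 || fhnQhead (x :: r)) x]
    rw [PySem.List.pyRange_one_cons hcons, List.foldl_cons, hstep]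
    have htail : r = P.drop (k + 1) := by
      rw [← List.tail_drop, ← hl]; rfl
    have hc : ((k : Int) + 1) = ((k + 1 : Nat) : Int) := by omega
    rw [hc, ih (k + 1) f2 (fhnQhead (x :: r)) _ htail, fhnFB_cons]

-- ===== VERDICT (by name: the statement is the Claim_ definition above) =====
theorem findHangingNotes_spec : Claim_equal_findHangingNotes := by
  intro pitches _
  unfold Spec_findHangingNotes findHangingNotes findHangingNotes_alt
  simp only [PySem.Set.empty]
  have hA := fhn_bridgeA pitches pitches 0 (([] : List Int), "") (by simp)
  have hB := fhn_bridgeB pitches pitches 0 false false (([] : List Int), "") (by simp)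
  simp only [Nat.cast_zero] at hA hB
  rw [hA, hB, fhn_main pitches false false (([] : List Int), "") (by simp) (by simp)]
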